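-- pv_equiv track=rewrite | github.com/matheusjreis/ORI | Lab_3/Ex2/Extensions/tfIdfPonderation.py | getMaxKeyList
-- ===== SOURCE A (Python) =====
-- def getDictionaryKeyByValue(dictionary: dict[any, any], searchValue: any) -> any:
--     """
--     Busca uma chave de um dicionário pelo valor dele
--     """
--     dictionaryKey: any = 0
--
--     for dictKey, dictValue in dictionary.items():
--         if dictValue == searchValue:
--             dictionaryKey = dictKey
--
--     return dictionaryKey
--
-- def getMaxKeyList(listOfDicts: list[dict[any, any]]) -> list[str]:
--     """
--     Busca a chave do termo maior valor no vocabulário.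
--     """
--     maxesKeysDict: list[any] = []
--     maxesValuesDict: list[int] = []
--     maxValue: any = 0
--
--     for dictionary in listOfDicts:
--         maxesValuesDict.append(max(dictionary.values()))
--
--     maxValue = max(maxesValuesDict)
--
--     for dictionary in listOfDicts:
--         maxValueKey: any = getDictionaryKeyByValue(dictionary, maxValue)
--         if maxValueKey != 0:
--             maxesKeysDict.append(maxValueKey)
--
--     return maxesKeysDict
-- ===== SOURCE B (Python) =====
-- def getMaxKeyList(listOfDicts: list[dict[any, any]]) -> list[str]:
--     """
--     One compute pass: for each dict record (its own max value, last key attaining it),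
--     then take the global max and filter the recorded pairs.
--     """
--     pairs = []
--     for dictionary in listOfDicts:
--         dictMax = None
--         lastKey = None
--         for key, value in dictionary.items():
--             if dictMax is None or value >= dictMax:
--                 dictMax = value
--                 lastKey = key
--         pairs.append((dictMax, lastKey))
--     maxValue = max(dictMax for dictMax, _ in pairs)
--     return [lastKey for dictMax, lastKey in pairs if dictMax == maxValue]
-- ===== Notes on version B (the rewrite author's own statement) =====
-- stated objective: alternative
-- what changed: B makes a single scan per dict recording (dict max, last key attaining it) and then just filters those recorded pairs against the global max, instead of A's separate max-only pass followed by a full re-scan of every dict searching for the global max with a sentinel-0 helper.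
import Mathlib
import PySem

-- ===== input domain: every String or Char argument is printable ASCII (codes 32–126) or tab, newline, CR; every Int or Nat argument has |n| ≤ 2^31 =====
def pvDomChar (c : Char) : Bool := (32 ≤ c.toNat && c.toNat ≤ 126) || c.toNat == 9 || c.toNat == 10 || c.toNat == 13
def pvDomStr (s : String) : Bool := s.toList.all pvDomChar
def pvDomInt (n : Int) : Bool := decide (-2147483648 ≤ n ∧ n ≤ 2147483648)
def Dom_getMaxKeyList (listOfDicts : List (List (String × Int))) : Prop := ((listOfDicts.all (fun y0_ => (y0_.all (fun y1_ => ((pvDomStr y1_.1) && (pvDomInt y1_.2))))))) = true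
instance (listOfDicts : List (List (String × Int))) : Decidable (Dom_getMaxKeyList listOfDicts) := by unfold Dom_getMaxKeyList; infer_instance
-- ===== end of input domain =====

-- B fuses A's two passes: one scan per dict recording (dict max, last key attaining it), then a filter
-- of the recorded pairs against the global max (alternative decomposition, same cost).


-- ===== PORT A =====
-- Python's sentinel is the int 0 while real keys are strings, so `dictionaryKey` is an
-- Option String: none = the sentinel 0, and `maxValueKey != 0` is exactly `≠ none`.
def pvKeyStep (searchValue : Int) (dictionaryKey : Option String) (kv : String × Int) : Option String :=
  if kv.2 == searchValue then some kv.1 else dictionaryKey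

def getDictionaryKeyByValue (dictionary : List (String × Int)) (searchValue : Int) : Option String :=
  dictionary.foldl (pvKeyStep searchValue) none

def getMaxKeyList (listOfDicts : List (List (String × Int))) : List String :=
  let maxesValuesDict : List Int :=
    listOfDicts.foldl (fun acc dictionary =>
      acc ++ [(PySem.List.max? (dictionary.map Prod.snd) (fun y => y)).getD 0]) []
  -- the `.getD 0` arms are only reached where Python's max() raises (excluded by Pre_)
  let maxValue : Int := (PySem.List.max? maxesValuesDict (fun y => y)).getD 0
  listOfDicts.foldl (fun maxesKeysDict dictionary =>
    match getDictionaryKeyByValue dictionary maxValue with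
    | some k => maxesKeysDict ++ [k]
    | none => maxesKeysDict) []

-- ===== PORT B =====
-- running (dictMax, lastKey) pair of Source B's inner loop; none = (None, None)
def pvScanStep (acc : Option (Int × String)) (kv : String × Int) : Option (Int × String) :=
  match acc with
  | none => some (kv.2, kv.1)
  | some (m, _) => if m ≤ kv.2 then some (kv.2, kv.1) else acc

def pvScanDict (dictionary : List (String × Int)) : Option (Int × String) :=
  dictionary.foldl pvScanStep none

def getMaxKeyList_alt (listOfDicts : List (List (String × Int))) : List String :=
  let pairs := listOfDicts.map pvScanDict
  let maxValue : Int :=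
    (PySem.List.max? (pairs.map (fun p => (p.map Prod.fst).getD 0)) (fun y => y)).getD 0
  pairs.filterMap (fun p =>
    match p with
    | some (m, k) => if m == maxValue then some k else none
    | none => none)

-- ===== PRECONDITION & SPEC =====
-- Pre_ excludes the inputs where Python raises ValueError (empty listOfDicts or an empty dict,
-- where max() gets an empty sequence) and association lists with duplicate keys inside one dict,
-- which do not represent a Python dict (dict construction collapses them).
def Pre_getMaxKeyList (listOfDicts : List (List (String × Int))) : Prop :=
  listOfDicts ≠ [] ∧ ∀ d ∈ listOfDicts, d ≠ [] ∧ (d.map Prod.fst).Nodup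
instance (listOfDicts : List (List (String × Int))) : Decidable (Pre_getMaxKeyList listOfDicts) := by
  unfold Pre_getMaxKeyList; infer_instance

def pvWitness_getMaxKeyList : (List (List (String × Int))) :=
  [[("a", 1)], [("b", 2), ("c", 2)]]

def Spec_getMaxKeyList (listOfDicts : List (List (String × Int))) (out : List String) : Prop := out = getMaxKeyList_alt listOfDicts
instance (listOfDicts : List (List (String × Int))) (out : List String) : Decidable (Spec_getMaxKeyList listOfDicts out) := by unfold Spec_getMaxKeyList; infer_instance

-- ===== CLAIM (what is proved, stated in full; the proofs are below) =====
def Claim_equal_getMaxKeyList : Prop := ∀ (listOfDicts : List (List (String × Int))), Dom_getMaxKeyList listOfDicts → Pre_getMaxKeyList listOfDicts → Spec_getMaxKeyList listOfDicts (getMaxKeyList listOfDicts)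

-- ===== LEMMAS AND PROOFS =====

-- A's first loop (append one max per dict) is a map.
lemma pv_foldl_append_map {α β : Type} (f : α → β) :
    ∀ (l : List α) (acc : List β),
      l.foldl (fun acc d => acc ++ [f d]) acc = acc ++ l.map f := by
  intro l
  induction l with
  | nil => simp
  | cons hd tl ih => intro acc; simp [ih]

-- A's second loop (append when the helper found a key) is a filterMap.
lemma pv_foldl_match_filterMap (f : List (String × Int) → Option String) :
    ∀ (l : List (List (String × Int))) (acc : List String),
      l.foldl (fun acc d => match f d with
        | some k => acc ++ [k]
        | none => acc) acc = acc ++ l.filterMap f := by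
  intro l
  induction l with
  | nil => simp
  | cons hd tl ih =>
    intro acc
    cases h : f hd <;> simp [List.foldl_cons, h, ih]

-- Joint invariant of Source B's running (dictMax, lastKey) scan and A's helper fold:
-- the scan computes the running max m' and, for any searched value V ≥ m', the helper fold
-- returns the scanned key iff V = m' and leaves its accumulator alone otherwise.
lemma pv_scan_joint :
    ∀ (d : List (String × Int)) (m : Int) (k : String),
      ∃ m' k',
        d.foldl pvScanStep (some (m, k)) = some (m', k') ∧
        m' = (d.map Prod.snd).foldl max m ∧ m ≤ m' ∧
        ∀ (V : Int) (a : Option String), m' ≤ V → (V = m → a = some k) →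
          d.foldl (pvKeyStep V) a = if V = m' then some k' else a := by
  intro d
  induction d with
  | nil =>
    intro m k
    refine ⟨m, k, rfl, rfl, le_refl m, ?_⟩
    intro V a _ hcond
    simp only [List.foldl_nil]
    split_ifs with h
    · exact hcond h
    · rfl
  | cons hd tl ih =>
    intro m k
    by_cases hm : m ≤ hd.2
    · obtain ⟨m', k', h1, h2, h3, h4⟩ := ih hd.2 hd.1
      refine ⟨m', k', ?_, ?_, le_trans hm h3, ?_⟩
      · simpa [List.foldl_cons, pvScanStep, hm] using h1
      · simpa [List.foldl_cons, max_eq_right hm] using h2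
      · intro V a hV hcond
        have step : pvKeyStep V a hd = if hd.2 == V then some hd.1 else a := rfl
        have hcond' : V = hd.2 → (if hd.2 == V then some hd.1 else a) = some hd.1 := by
          intro h; simp [h]
        have := h4 V (if hd.2 == V then some hd.1 else a) hV hcond'
        rw [List.foldl_cons, step, this]
        split_ifs with hVm h2v
        · rfl
        · exfalso
          have heq : hd.2 = V := by simpa using h2v
          omega
        · rfl
    · obtain ⟨m', k', h1, h2, h3, h4⟩ := ih m k
      have hlt : hd.2 < m := lt_of_not_ge hm
      refine ⟨m', k', ?_, ?_, h3, ?_⟩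
      · simpa [List.foldl_cons, pvScanStep, hm] using h1
      · simpa [List.foldl_cons, max_eq_left (le_of_lt hlt)] using h2
      · intro V a hV hcond
        have step : pvKeyStep V a hd = if hd.2 == V then some hd.1 else a := rfl
        have hcond' : V = m → (if hd.2 == V then some hd.1 else a) = some k := by
          intro h
          have hb : ¬ hd.2 = V := by intro hb; omega
          simp [hb]; exact hcond h
        have := h4 V (if hd.2 == V then some hd.1 else a) hV hcond'
        rw [List.foldl_cons, step, this]
        split_ifs with hVm h2v
        · rfl
        · exfalso
          have heq : hd.2 = V := by simpa using h2v
          omega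
        · rfl

-- Per-dict characterisation: on a nonempty dict the scan returns (its max value, last key
-- attaining it), and for any V ≥ that max A's helper returns that key iff V equals it.
lemma pv_scan_char (d : List (String × Int)) (hd : d ≠ []) :
    ∃ m k, pvScanDict d = some (m, k) ∧
      (PySem.List.max? (d.map Prod.snd) (fun y => y)).getD 0 = m ∧
      ∀ V, m ≤ V → getDictionaryKeyByValue d V = if V = m then some k else none := by
  match d with
  | [] => exact absurd rfl hd
  | h0 :: rest =>
    obtain ⟨m', k', h1, h2, h3, h4⟩ := pv_scan_joint rest h0.2 h0.1
    refine ⟨m', k', ?_, ?_, ?_⟩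
    · simpa [pvScanDict, List.foldl_cons, pvScanStep] using h1
    · rw [List.map_cons, PySem.List.max?_id_cons]
      simpa using h2.symm
    · intro V hV
      have hcond : V = h0.2 → (if h0.2 == V then some h0.1 else none : Option String) = some h0.1 := by
        intro h; simp [h]
      have := h4 V (if h0.2 == V then some h0.1 else none) hV hcond
      unfold getDictionaryKeyByValue
      rw [List.foldl_cons]
      have step : pvKeyStep V none h0 = if h0.2 == V then some h0.1 else none := rfl
      rw [step, this]
      split_ifs with hVm h2v
      · rfl
      · exfalso
        have heq : h0.2 = V := by simpa using h2v
        omega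
      · rfl

-- ===== VERDICT (by name: the statement is the Claim_ definition above) =====
theorem getMaxKeyList_spec : Claim_equal_getMaxKeyList := by
  intro l _dom hpre
  obtain ⟨hne, hall⟩ := hpre
  unfold Spec_getMaxKeyList getMaxKeyList getMaxKeyList_alt
  -- A's maxes list is a map, equal to B's maxes list
  rw [pv_foldl_append_map (fun d => (PySem.List.max? (d.map Prod.snd) (fun y => y)).getD 0) l []]
  have hmaxes :
      l.map (fun d => (PySem.List.max? (d.map Prod.snd) (fun y => y)).getD 0) =
      (l.map pvScanDict).map (fun p => (p.map Prod.fst).getD 0) := by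
    rw [List.map_map]
    apply List.map_congr_left
    intro d hd
    obtain ⟨m, k, hs, hmax, _⟩ := pv_scan_char d (hall d hd).1
    simp [Function.comp, hs, hmax]
  simp only [List.nil_append, hmaxes]
  set V : Int :=
    (PySem.List.max? ((l.map pvScanDict).map (fun p => (p.map Prod.fst).getD 0)) (fun y => y)).getD 0
    with hVdef
  -- every dict's own max is ≤ V
  have hbound : ∀ d ∈ l, ∀ m k, pvScanDict d = some (m, k) → m ≤ V := by
    intro d hd m k hs
    have hmem : m ∈ (l.map pvScanDict).map (fun p => (p.map Prod.fst).getD 0) := by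
      rw [List.map_map]
      refine List.mem_map.mpr ⟨d, hd, ?_⟩
      simp [Function.comp, hs]
    rcases hM : PySem.List.max? ((l.map pvScanDict).map (fun p => (p.map Prod.fst).getD 0)) (fun y => y) with _ | M
    · rw [PySem.List.max?_eq_none_iff] at hM
      simp [hM] at hmem
    · have := PySem.List.max?_isMax hM m hmem
      simp only [hVdef, hM, Option.getD_some]
      exact this
  rw [pv_foldl_match_filterMap (fun d => getDictionaryKeyByValue d V) l []]
  rw [List.filterMap_map, List.nil_append]
  apply List.filterMap_congr
  intro d hd
  obtain ⟨m, k, hs, _, hkey⟩ := pv_scan_char d (hall d hd).1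
  have hmV : m ≤ V := hbound d hd m k hs
  simp only [Function.comp, hs, hkey V hmV]
  by_cases h : V = m
  · simp [h]
  · have hb : (m == V) = false := beq_eq_false_iff_ne.mpr (fun hmv => h hmv.symm)
    simp [h, hb]
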